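-- pv_equiv track=rewrite | github.com/ElvisRodriguez/daily_coding_problems | python/max_common_substring.py | find_common_chars_slow
-- ===== SOURCE A (Python) =====
-- def find_common_chars_slow(first_string, second_string):
--     # Make a mutable representation of the second string
--     # We'll be deleting characters, so we need a mutable container
--     second_string_list = list(second_string)
--     # Store the longest common subsequence amongst the two strings
--     common_chars = []
--     for char in first_string:
--         if char in second_string_list:
--             common_chars.append(char)
--             # Grab the index of the char in the second string
--             # so that we can resize second_string_list
--             index = second_string_list.index(char)
--             # We slice the string list so that we don't have false
--             # multiples of characters
--             second_string_list = second_string_list[index+1:]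
--     return ''.join(common_chars)
-- ===== SOURCE B (Python) =====
-- def find_common_chars_slow(first_string, second_string):
--     # One pass over second_string: positions[c] = ascending list of indices of c.
--     positions = {}
--     for i, c in enumerate(second_string):
--         positions.setdefault(c, []).append(i)
--     common_chars = []
--     j = 0  # everything before index j of second_string is already consumed
--     for c in first_string:
--         ps = positions.get(c)
--         if ps is None:
--             continue
--         # binary search: first index in ps holding a position >= j
--         lo, hi = 0, len(ps)
--         while lo < hi:
--             mid = (lo + hi) // 2
--             if ps[mid] < j:
--                 lo = mid + 1
--             else:
--                 hi = mid
--         if lo < len(ps):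
--             common_chars.append(c)
--             j = ps[lo] + 1
--     return ''.join(common_chars)
-- ===== Notes on version B (the rewrite author's own statement) =====
-- stated objective: faster
-- what changed: Instead of repeatedly re-slicing a mutable copy of second_string and re-scanning it with 'in'/'.index' for every character, B precomputes one dict of ascending occurrence positions per character of second_string and advances a single integer cursor, finding each next occurrence by binary search over that character's position list.
import Mathlib
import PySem

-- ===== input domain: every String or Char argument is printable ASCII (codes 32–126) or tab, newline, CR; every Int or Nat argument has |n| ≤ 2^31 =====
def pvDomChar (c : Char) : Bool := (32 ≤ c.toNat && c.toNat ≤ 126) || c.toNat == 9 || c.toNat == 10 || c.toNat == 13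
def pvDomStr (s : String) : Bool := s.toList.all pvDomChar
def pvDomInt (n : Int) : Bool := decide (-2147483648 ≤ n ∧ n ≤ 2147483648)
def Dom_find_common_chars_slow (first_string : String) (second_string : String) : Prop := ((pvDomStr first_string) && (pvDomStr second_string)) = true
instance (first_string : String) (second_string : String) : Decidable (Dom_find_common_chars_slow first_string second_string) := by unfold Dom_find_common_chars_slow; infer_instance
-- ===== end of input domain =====

-- B replaces A's repeated list re-slicing and linear 'in'/'.index' scans by a precomputed
-- per-character position dict plus a cursor with binary search (objective: faster).


-- ===== PORT A =====
-- one iteration of A's for-loop; state = (second_string_list, common_chars)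
def pvAStep (st : List Char × List Char) (c : Char) : List Char × List Char :=
  if c ∈ st.1 then
    match PySem.List.index? st.1 c with
    | some index => (PySem.List.slice st.1 (some ((index : Int) + 1)) none, st.2 ++ [c])
    | none => st  -- unreachable: guarded by the membership test (Python's .index cannot raise here)
  else st

def find_common_chars_slow (first_string : String) (second_string : String) : String :=
  String.ofList (first_string.toList.foldl pvAStep (second_string.toList, [])).2

-- ===== PORT B =====
-- positions[c] = ascending list of indices of c in s (Source B's enumerate/setdefault loop)
def pvPosDict (s : List Char) : PySem.Dict Char (List Int) :=
  (PySem.List.enumerate s 0).foldl (fun d p => d.modify p.2 [] (· ++ [p.1])) PySem.Dict.empty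

-- Source B's hand-written while-loop binary search (mid = (lo + hi) // 2); ps[mid] is in range whenever it is read
def pvLowerBound (ps : List Int) (j : Int) (lo hi : Nat) : Nat :=
  if lo < hi then
    if ps.getD ((lo + hi) / 2) 0 < j then pvLowerBound ps j ((lo + hi) / 2 + 1) hi
    else pvLowerBound ps j lo ((lo + hi) / 2)
  else lo
termination_by hi - lo
decreasing_by all_goals omega

-- one iteration of Source B's for-loop; state = (j, common_chars)
def pvBStep (pos : PySem.Dict Char (List Int)) (st : Int × List Char) (c : Char) : Int × List Char :=
  match pos.get? c with
  | none => st
  | some ps =>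
    let lo := pvLowerBound ps st.1 0 ps.length
    if lo < ps.length then (ps.getD lo 0 + 1, st.2 ++ [c]) else st

def find_common_chars_slow_alt (first_string : String) (second_string : String) : String :=
  String.ofList (first_string.toList.foldl (pvBStep (pvPosDict second_string.toList)) (0, [])).2

-- ===== PRECONDITION & SPEC =====
def Spec_find_common_chars_slow (first_string : String) (second_string : String) (out : String) : Prop := out = find_common_chars_slow_alt first_string second_string
instance (first_string : String) (second_string : String) (out : String) : Decidable (Spec_find_common_chars_slow first_string second_string out) := by unfold Spec_find_common_chars_slow; infer_instance

-- ===== CLAIM (what is proved, stated in full; the proofs are below) =====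
def Claim_equal_find_common_chars_slow : Prop := ∀ (first_string : String) (second_string : String), Dom_find_common_chars_slow first_string second_string → Spec_find_common_chars_slow first_string second_string (find_common_chars_slow first_string second_string)

-- ===== LEMMAS AND PROOFS =====

-- reference recursion both folds are reduced to: greedy matching with a cursor j into s
def pvSpec (s : List Char) : List Char → Nat → List Char
  | [], _ => []
  | c :: rest, j =>
    match PySem.List.index? (s.drop j) c with
    | some i => c :: pvSpec s rest (j + i + 1)
    | none => pvSpec s rest j

-- ascending list of all indices of c
def pvPosNat (c : Char) : List Char → List Nat
  | [] => []
  | a :: t => if a = c then 0 :: (pvPosNat c t).map (· + 1) else (pvPosNat c t).map (· + 1)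

lemma pvIndex?_eq_head (c : Char) (xs : List Char) :
    PySem.List.index? xs c = (pvPosNat c xs).head? := by
  induction xs with
  | nil => simp [pvPosNat]
  | cons a t ih =>
    by_cases h : a = c
    · subst h; rw [PySem.List.index?_cons_self]; simp [pvPosNat]
    · rw [PySem.List.index?_cons_of_ne t h, ih]
      simp [pvPosNat, h, List.head?_map]

lemma pvPosNat_sorted (c : Char) (s : List Char) : (pvPosNat c s).Pairwise (· < ·) := by
  induction s with
  | nil => simp [pvPosNat]
  | cons a t ih =>
    have hm : ((pvPosNat c t).map (· + 1)).Pairwise (· < ·) :=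
      List.Pairwise.map _ (by omega) ih
    by_cases h : a = c <;> simp [pvPosNat, h, hm]

lemma pvPosNat_filter (c : Char) : ∀ (j : Nat) (s : List Char),
    (pvPosNat c s).filter (fun n => decide (j ≤ n)) = (pvPosNat c (s.drop j)).map (· + j) := by
  intro j
  induction j with
  | zero => intro s; simp
  | succ j ih =>
    intro s
    cases s with
    | nil => simp [pvPosNat]
    | cons a t =>
      have hpred : ((fun n => decide (j + 1 ≤ n)) ∘ (fun n => n + 1)) = (fun n => decide (j ≤ n)) := by
        funext n; simp
      have hmap : ∀ (L : List Nat),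
          (L.map (· + 1)).filter (fun n => decide (j + 1 ≤ n)) =
            (L.filter (fun n => decide (j ≤ n))).map (· + 1) := by
        intro L; rw [List.filter_map, hpred]
      have hfun : ∀ (X : List Nat), (X.map (· + j)).map (· + 1) = X.map (· + (j + 1)) := by
        intro X; rw [List.map_map]; congr 1
      by_cases h : a = c
      · simp only [pvPosNat, h, if_true, List.drop_succ_cons, List.filter_cons,
          decide_eq_true_eq, hmap, ih t, hfun]
        rw [if_neg (by omega)]
      · simp only [pvPosNat, h, if_false, List.drop_succ_cons, hmap, ih t, hfun]

lemma pvEnum_filter (c : Char) : ∀ (s : List Char) (k : Int),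
    ((PySem.List.enumerate s k).filter (fun p => p.2 == c)).map (·.1) =
      (pvPosNat c s).map (fun (n : Nat) => k + (n : Int)) := by
  intro s
  induction s with
  | nil => intro k; simp [pvPosNat, PySem.List.enumerate_nil]
  | cons a t ih =>
    intro k
    rw [PySem.List.enumerate_cons]
    by_cases h : a = c
    · subst h
      have hp : pvPosNat a (a :: t) = 0 :: (pvPosNat a t).map (· + 1) := by
        simp [pvPosNat]
      rw [List.filter_cons_of_pos (by simp), List.map_cons, ih (k + 1), hp,
        List.map_cons, List.map_map]
      congr 1
      · simp
      · refine List.map_congr_left fun n _ => ?_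
        simp only [Function.comp_apply]
        push_cast
        omega
    · have hp : pvPosNat c (a :: t) = (pvPosNat c t).map (· + 1) := by
        simp [pvPosNat, h]
      rw [List.filter_cons_of_neg (by simp [h]), ih (k + 1), hp, List.map_map]
      refine List.map_congr_left fun n _ => ?_
      simp only [Function.comp_apply]
      push_cast
      omega

lemma pvPosDict_getD (s : List Char) (c : Char) :
    (pvPosDict s).getD c [] = (pvPosNat c s).map (fun (n : Nat) => (n : Int)) := by
  unfold pvPosDict
  have hswap : (PySem.List.enumerate s 0).foldl (fun d p => d.modify p.2 [] (· ++ [p.1]))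
      PySem.Dict.empty =
      ((PySem.List.enumerate s 0).map (fun p => (p.2, p.1))).foldl
        (fun d q => d.modify q.1 [] (· ++ [q.2])) PySem.Dict.empty := by
    rw [List.foldl_map]
  rw [hswap, PySem.Dict.getD_foldl_modify_append]
  rw [List.filter_map]
  have : ((fun p : Char × Int => p.1 == c) ∘ (fun p : Int × Char => (p.2, p.1))) =
      (fun p : Int × Char => p.2 == c) := by funext p; rfl
  rw [this, List.map_map]
  have : ((fun x : Char × Int => x.2) ∘ (fun p : Int × Char => (p.2, p.1))) =
      (fun p : Int × Char => p.1) := by funext p; rfl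
  rw [this]
  rw [pvEnum_filter c s 0]
  simp

lemma pvLowerBound_spec (ps : List Int) (j : Int) (hs : ps.Pairwise (· < ·)) :
    ∀ (n lo hi : Nat), hi - lo = n → hi ≤ ps.length → lo ≤ hi →
    (∀ k, k < lo → ps.getD k 0 < j) →
    (∀ k, hi ≤ k → k < ps.length → j ≤ ps.getD k 0) →
    (pvLowerBound ps j lo hi ≤ ps.length ∧
     (∀ k, k < pvLowerBound ps j lo hi → ps.getD k 0 < j) ∧
     (∀ k, pvLowerBound ps j lo hi ≤ k → k < ps.length → j ≤ ps.getD k 0)) := by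
  have hmono : ∀ a b : Nat, a ≤ b → b < ps.length → ps.getD a 0 ≤ ps.getD b 0 := by
    intro a b hab hb
    rcases Nat.eq_or_lt_of_le hab with rfl | hlt
    · exact le_refl _
    · have ha : a < ps.length := lt_trans hlt hb
      rw [List.getD_eq_getElem ps 0 ha, List.getD_eq_getElem ps 0 hb]
      exact le_of_lt (List.pairwise_iff_getElem.mp hs a b ha hb hlt)
  intro n
  induction n using Nat.strong_induction_on with
  | _ n IH =>
    intro lo hi hn hhi hlohi hlo hhi2
    rw [pvLowerBound]
    by_cases h : lo < hi
    · rw [if_pos h]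
      have hmidlt : (lo + hi) / 2 < hi := by omega
      have hmidge : lo ≤ (lo + hi) / 2 := by omega
      have hmidlen : (lo + hi) / 2 < ps.length := lt_of_lt_of_le hmidlt hhi
      by_cases hc : ps.getD ((lo + hi) / 2) 0 < j
      · rw [if_pos hc]
        refine IH (hi - ((lo + hi) / 2 + 1)) (by omega) _ _ rfl hhi (by omega) ?_ hhi2
        intro k hk
        exact lt_of_le_of_lt (hmono k ((lo + hi) / 2) (by omega) hmidlen) hc
      · rw [if_neg hc]
        rw [not_lt] at hc
        refine IH ((lo + hi) / 2 - lo) (by omega) _ _ rfl (by omega) (by omega) hlo ?_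
        intro k hk hklen
        exact le_trans hc (hmono ((lo + hi) / 2) k hk hklen)
    · rw [if_neg h]
      have : lo = hi := by omega
      subst this
      exact ⟨hhi, fun k hk => hlo k hk, fun k hk hklen => hhi2 k hk hklen⟩

lemma pvFilter_eq_drop (N : List Nat) (j r : Nat) (hr : r ≤ N.length)
    (h1 : ∀ k, k < r → (hk : k < N.length) → N[k] < j)
    (h2 : ∀ (k : Nat) (hk : k < N.length), r ≤ k → j ≤ N[k]) :
    N.filter (fun n => decide (j ≤ n)) = N.drop r := by
  conv_lhs => rw [← List.take_append_drop r N]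
  rw [List.filter_append]
  have ht : (N.take r).filter (fun n => decide (j ≤ n)) = [] := by
    rw [List.filter_eq_nil_iff]
    intro a ha
    obtain ⟨k, hk, hEq⟩ := List.mem_take_iff_getElem.mp ha
    subst hEq
    simp only [decide_eq_true_eq]
    intro habs
    exact absurd habs (by have := h1 k (by omega) (by omega); omega)
  have hd : (N.drop r).filter (fun n => decide (j ≤ n)) = N.drop r := by
    rw [List.filter_eq_self]
    intro a ha
    obtain ⟨k, hk, hEq⟩ := List.mem_drop_iff_getElem.mp ha
    subst hEq
    simp only [decide_eq_true_eq]
    exact h2 (r + k) (by omega) (by omega)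
  rw [ht, hd, List.nil_append]

lemma pvA_step_eq (s : List Char) (c : Char) (j : Nat) (acc : List Char) :
    pvAStep (s.drop j, acc) c =
      match PySem.List.index? (s.drop j) c with
      | some i => (s.drop (j + i + 1), acc ++ [c])
      | none => (s.drop j, acc) := by
  unfold pvAStep
  by_cases hm : c ∈ s.drop j
  · rw [if_pos hm]
    obtain ⟨i, hi⟩ := Option.isSome_iff_exists.mp ((PySem.List.index?_isSome_iff _ _).mpr hm)
    rw [hi]
    dsimp only
    have hcast : ((i : Int) + 1) = ((i + 1 : Nat) : Int) := by push_cast; ring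
    rw [hcast, PySem.List.slice_from_natCast, List.drop_drop]
    have : j + (i + 1) = j + i + 1 := by omega
    rw [this]
  · rw [if_neg hm, (PySem.List.index?_eq_none_iff _ _).mpr hm]

lemma pvB_step_eq (s : List Char) (c : Char) (j : Nat) (acc : List Char) :
    pvBStep (pvPosDict s) ((j : Int), acc) c =
      match PySem.List.index? (s.drop j) c with
      | some i => (((j + i + 1 : Nat) : Int), acc ++ [c])
      | none => ((j : Int), acc) := by
  unfold pvBStep
  cases hget : (pvPosDict s).get? c with
  | none =>
    have hD : (pvPosDict s).getD c [] = [] := by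
      rw [PySem.Dict.getD_eq_get?_getD, hget]; rfl
    have hN : pvPosNat c s = [] := by
      have := pvPosDict_getD s c
      rw [hD] at this
      exact (List.map_eq_nil_iff.mp this.symm)
    have hnm : c ∉ s := by
      have := pvIndex?_eq_head c s
      rw [hN] at this
      exact (PySem.List.index?_eq_none_iff s c).mp this
    have : PySem.List.index? (s.drop j) c = none :=
      (PySem.List.index?_eq_none_iff _ _).mpr (fun h => hnm (List.mem_of_mem_drop h))
    rw [this]
  | some ps =>
    have hps : ps = (pvPosNat c s).map (fun (n : Nat) => (n : Int)) := by
      have hD : (pvPosDict s).getD c [] = ps := by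
        rw [PySem.Dict.getD_eq_get?_getD, hget]; rfl
      rw [← hD, pvPosDict_getD]
    have hsort : ps.Pairwise (· < ·) := by
      rw [hps]
      exact List.Pairwise.map _ (fun a b h => by exact_mod_cast h) (pvPosNat_sorted c s)
    set N := pvPosNat c s with hNdef
    have hlen : ps.length = N.length := by rw [hps]; simp
    obtain ⟨hrlen, H1, H2⟩ := pvLowerBound_spec ps (j : Int) hsort ps.length 0 ps.length rfl
      le_rfl (Nat.zero_le _) (by omega) (fun k hk hk2 => by omega)
    set r := pvLowerBound ps (j : Int) 0 ps.length with hrdef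
    have hgetD : ∀ (k : Nat), k < N.length → ps.getD k 0 = (N[k]! : Int) := by
      intro k hk
      rw [hps, List.getD_eq_getElem _ _ (by simpa using hk)]
      simp [hk]
    have hfilter : N.filter (fun n => decide (j ≤ n)) = N.drop r := by
      refine pvFilter_eq_drop N j r (hlen ▸ hrlen) ?_ ?_
      · intro k hk hk2
        have := H1 k hk
        rw [hgetD k hk2] at this
        have h3 : (N[k]! : Int) = (N[k] : Int) := by simp [List.getElem!_eq_getElem?_getD, List.getElem?_eq_getElem hk2]
        rw [h3] at this
        exact_mod_cast this
      · intro k hk hk2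
        have := H2 k hk2 (by omega)
        rw [hgetD k hk] at this
        have h3 : (N[k]! : Int) = (N[k] : Int) := by simp [List.getElem!_eq_getElem?_getD, List.getElem?_eq_getElem hk]
        rw [h3] at this
        exact_mod_cast this
    have hfd : N.drop r = (pvPosNat c (s.drop j)).map (· + j) := by
      rw [← hfilter, hNdef, pvPosNat_filter]
    have hidx : PySem.List.index? (s.drop j) c = (pvPosNat c (s.drop j)).head? :=
      pvIndex?_eq_head c (s.drop j)
    cases hM : pvPosNat c (s.drop j) with
    | nil =>
      rw [hM] at hfd
      simp only [List.map_nil] at hfd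
      have hrge : ¬ (r < ps.length) := by
        rw [hlen]
        rw [List.drop_eq_nil_iff] at hfd
        omega
      rw [hidx, hM]
      simp only [List.head?_nil]
      rw [if_neg hrge]
    | cons i tl =>
      rw [hM] at hfd
      rw [hidx, hM]
      simp only [List.head?_cons]
      have hrlt : r < N.length := by
        by_contra hge
        rw [List.drop_eq_nil_iff.mpr (by omega)] at hfd
        simp at hfd
      rw [if_pos (by omega)]
      have hNr : N[r]'hrlt = i + j := by
        have : (N.drop r).head? = some (i + j) := by rw [hfd]; simp
        rw [List.head?_drop] at this
        rw [List.getElem?_eq_getElem hrlt] at this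
        exact Option.some_injective _ this
      have : ps.getD r 0 = ((i + j : Nat) : Int) := by
        rw [hgetD r hrlt]
        simp [List.getElem!_eq_getElem?_getD, List.getElem?_eq_getElem hrlt, hNr]
      rw [this]
      have : ((i + j : Nat) : Int) + 1 = ((j + i + 1 : Nat) : Int) := by push_cast; ring
      rw [this]

lemma pvA_fold (s : List Char) : ∀ (chars : List Char) (j : Nat) (acc : List Char),
    (chars.foldl pvAStep (s.drop j, acc)).2 = acc ++ pvSpec s chars j := by
  intro chars
  induction chars with
  | nil => intro j acc; simp [pvSpec]
  | cons c rest ih =>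
    intro j acc
    rw [List.foldl_cons, pvA_step_eq]
    cases h : PySem.List.index? (s.drop j) c with
    | some i =>
      dsimp only
      rw [ih (j + i + 1) (acc ++ [c])]
      simp only [pvSpec, h]
      simp
    | none =>
      dsimp only
      rw [ih j acc]
      simp only [pvSpec, h]

lemma pvB_fold (s : List Char) : ∀ (chars : List Char) (j : Nat) (acc : List Char),
    (chars.foldl (pvBStep (pvPosDict s)) ((j : Int), acc)).2 = acc ++ pvSpec s chars j := by
  intro chars
  induction chars with
  | nil => intro j acc; simp [pvSpec]
  | cons c rest ih =>
    intro j acc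
    rw [List.foldl_cons, pvB_step_eq]
    cases h : PySem.List.index? (s.drop j) c with
    | some i =>
      dsimp only
      rw [ih (j + i + 1) (acc ++ [c])]
      simp only [pvSpec, h]
      simp
    | none =>
      dsimp only
      rw [ih j acc]
      simp only [pvSpec, h]

-- ===== VERDICT (by name: the statement is the Claim_ definition above) =====
theorem find_common_chars_slow_spec : Claim_equal_find_common_chars_slow := by
  intro f s _
  show _ = _
  unfold find_common_chars_slow find_common_chars_slow_alt
  congr 1
  have hA := pvA_fold s.toList f.toList 0 []
  have hB := pvB_fold s.toList f.toList 0 []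
  simp only [List.drop_zero] at hA
  simp only [Nat.cast_zero] at hB
  rw [hA, hB]
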